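-- pv_equiv track=rewrite | github.com/esaul314/chunkify | pdf_chunker/passes/split_semantic.py | _overlap_window
-- ===== SOURCE A (Python) =====
-- def _overlap_window(
--     prev_words: tuple[str, ...], current_words: tuple[str, ...], limit: int
-- ) -> int:
--     match_limit = min(limit, len(prev_words), len(current_words))
--     return next(
--         (
--             size
--             for size in range(match_limit, 0, -1)
--             if prev_words[-size:] == current_words[:size]
--         ),
--         0,
--     )
-- ===== SOURCE B (Python) =====
-- def _overlap_window(
--     prev_words: tuple[str, ...], current_words: tuple[str, ...], limit: int
-- ) -> int:
--     # Candidate-elimination stream: seed every candidate overlap size with its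
--     # suffix of prev_words, then scan current_words once, advancing each
--     # surviving candidate one word at a time and recording completed ones.
--     n = len(prev_words)
--     cap = min(limit, n, len(current_words))
--     alive = [(s, prev_words[n - s:]) for s in range(1, cap + 1)]
--     best = 0
--     for w in current_words:
--         nxt = []
--         for s, rest in alive:
--             if rest[0] == w:
--                 if len(rest) == 1:
--                     best = max(best, s)
--                 else:
--                     nxt.append((s, rest[1:]))
--         alive = nxt
--     return best
-- ===== Notes on version B (the rewrite author's own statement) =====
-- stated objective: alternative
-- what changed: B replaces A's per-size suffix/prefix slice comparisons with a single streaming pass over current_words that advances a pool of candidate overlaps one word at a time, eliminating a candidate at its first mismatching word and recording a candidate when its suffix is fully consumed.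
import Mathlib
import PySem

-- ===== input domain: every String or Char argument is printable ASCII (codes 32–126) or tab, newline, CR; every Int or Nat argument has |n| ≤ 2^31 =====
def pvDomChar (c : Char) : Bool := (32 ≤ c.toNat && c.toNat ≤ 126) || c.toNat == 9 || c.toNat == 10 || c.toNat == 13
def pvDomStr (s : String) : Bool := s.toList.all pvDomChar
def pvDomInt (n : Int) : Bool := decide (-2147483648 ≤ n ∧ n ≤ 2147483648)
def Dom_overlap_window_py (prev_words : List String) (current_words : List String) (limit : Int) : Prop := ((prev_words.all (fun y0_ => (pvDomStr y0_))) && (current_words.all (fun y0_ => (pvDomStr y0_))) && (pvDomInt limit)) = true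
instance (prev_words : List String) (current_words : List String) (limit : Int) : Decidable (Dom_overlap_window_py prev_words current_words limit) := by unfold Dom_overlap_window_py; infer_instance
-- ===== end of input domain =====

-- B replaces A's per-size slice comparisons with one streaming pass over current_words
-- that advances a pool of candidate overlaps word by word (objective: alternative).

-- ===== PORT A =====
def overlap_window_py (prev_words : List String) (current_words : List String) (limit : Int) : Int :=
  let match_limit : Int := min (min limit (prev_words.length : Int)) (current_words.length : Int)
  (((PySem.List.pyRange match_limit 0 (-1)).find? (fun size =>
      PySem.List.slice prev_words (some (-size)) none == PySem.List.slice current_words none (some size))).getD 0)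

-- ===== PORT B =====
-- inner loop body: one candidate (size, rest) against the current word w
def owInner (w : String) (acc : Int × List (Int × List String)) (p : Int × List String) : Int × List (Int × List String) :=
  match PySem.List.pyGet? p.2 0 with
  | none => acc          -- unreachable in B: every candidate's rest is nonempty
  | some x =>
    if x == w then
      if ((p.2.length : Int) == 1) then (max acc.1 p.1, acc.2)
      else (acc.1, acc.2 ++ [(p.1, PySem.List.slice p.2 (some 1) none)])
    else acc

-- outer loop body: one word of current_words against the whole candidate pool
def owStep (st : Int × List (Int × List String)) (w : String) : Int × List (Int × List String) :=
  st.2.foldl (owInner w) (st.1, [])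

def overlap_window_py_alt (prev_words : List String) (current_words : List String) (limit : Int) : Int :=
  let n : Int := prev_words.length
  let cap : Int := min (min limit n) (current_words.length : Int)
  let alive0 : List (Int × List String) :=
    (PySem.List.pyRange 1 (cap + 1) 1).map (fun s => (s, PySem.List.slice prev_words (some (n - s)) none))
  (current_words.foldl owStep (0, alive0)).1

-- ===== PRECONDITION & SPEC =====
def Spec_overlap_window_py (prev_words : List String) (current_words : List String) (limit : Int) (out : Int) : Prop := out = overlap_window_py_alt prev_words current_words limit
instance (prev_words : List String) (current_words : List String) (limit : Int) (out : Int) : Decidable (Spec_overlap_window_py prev_words current_words limit out) := by unfold Spec_overlap_window_py; infer_instance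

-- ===== CLAIM (what is proved, stated in full; the proofs are below) =====
def Claim_equal_overlap_window_py : Prop := ∀ (prev_words : List String) (current_words : List String) (limit : Int), Dom_overlap_window_py prev_words current_words limit → Spec_overlap_window_py prev_words current_words limit (overlap_window_py prev_words current_words limit)

-- ===== LEMMAS AND PROOFS =====

-- the per-candidate contribution of the REMAINING words todo: a candidate (s, rest)
-- eventually completes iff its rest is a nonempty prefix of todo
def gP (todo : List String) (b : Int) (p : Int × List String) : Int :=
  if p.2 ≠ [] ∧ p.2 <+: todo then max b p.1 else b

theorem gP_nil (b : Int) (p : Int × List String) : gP [] b p = b := by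
  simp [gP]

theorem foldl_gP_nil : ∀ (l : List (Int × List String)) (b : Int), l.foldl (gP []) b = b := by
  intro l
  induction l with
  | nil => intro b; rfl
  | cons p t ih => intro b; simp [gP_nil, ih]

theorem foldl_gP_max (todo : List String) :
    ∀ (l : List (Int × List String)) (b s : Int),
      l.foldl (gP todo) (max b s) = max (l.foldl (gP todo) b) s := by
  intro l
  induction l with
  | nil => intro b s; rfl
  | cons p t ih =>
      intro b s
      simp only [List.foldl_cons]
      by_cases h : p.2 ≠ [] ∧ p.2 <+: todo
      · have e1 : gP todo (max b s) p = max (max b p.1) s := by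
          simp only [gP, if_pos h]; exact max_right_comm b s p.1
        have e2 : gP todo b p = max b p.1 := by simp only [gP, if_pos h]
        rw [e1, e2, ih]
      · have e1 : gP todo (max b s) p = max b s := by simp only [gP, if_neg h]
        have e2 : gP todo b p = b := by simp only [gP, if_neg h]
        rw [e1, e2, ih]

-- one outer step decomposed: processing word w then folding gP ws over the survivors
-- equals folding gP (w :: ws) over the incoming pool
theorem step_decomp (w : String) (ws : List String) :
    ∀ (alive : List (Int × List String)) (best : Int) (nxt0 : List (Int × List String)),
      ((alive.foldl (owInner w) (best, nxt0)).2).foldl (gP ws) ((alive.foldl (owInner w) (best, nxt0)).1)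
        = alive.foldl (gP (w :: ws)) (nxt0.foldl (gP ws) best) := by
  intro alive
  induction alive with
  | nil => intro best nxt0; rfl
  | cons p t ih =>
      intro best nxt0
      obtain ⟨s, rest⟩ := p
      cases rest with
      | nil =>
          have h1 : owInner w (best, nxt0) (s, []) = (best, nxt0) := by
            simp [owInner, PySem.List.pyGet?, PySem.List.pyIdx?]
          have h2 : gP (w :: ws) (nxt0.foldl (gP ws) best) (s, ([] : List String))
              = nxt0.foldl (gP ws) best := by simp [gP]
          simp only [List.foldl_cons, h1, h2, ih]
      | cons x xs =>
          by_cases hx : x = w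
          · subst hx
            by_cases hxs : xs = []
            · subst hxs
              have h1 : owInner x (best, nxt0) (s, [x]) = (max best s, nxt0) := by
                simp [owInner]
              have h2 : gP (x :: ws) (nxt0.foldl (gP ws) best) (s, [x])
                  = max (nxt0.foldl (gP ws) best) s := by
                simp [gP, List.cons_prefix_cons]
              simp only [List.foldl_cons, h1, h2, ih, foldl_gP_max]
            · have h1 : owInner x (best, nxt0) (s, x :: xs)
                  = (best, nxt0 ++ [(s, xs)]) := by
                simp [owInner, hxs, PySem.List.slice_from_one]
              have h2 : gP ws (nxt0.foldl (gP ws) best) (s, xs)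
                  = gP (x :: ws) (nxt0.foldl (gP ws) best) (s, x :: xs) := by
                simp [gP, List.cons_prefix_cons, hxs]
              simp only [List.foldl_cons, h1, ih, List.foldl_append, List.foldl_cons,
                List.foldl_nil, h2]
          · have h1 : owInner w (best, nxt0) (s, x :: xs) = (best, nxt0) := by
              simp [owInner, hx]
            have h2 : gP (w :: ws) (nxt0.foldl (gP ws) best) (s, x :: xs)
                = nxt0.foldl (gP ws) best := by
              simp [gP, List.cons_prefix_cons, hx]
            simp only [List.foldl_cons, h1, h2, ih]

-- the whole streaming loop computes, for each initial candidate independently,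
-- "max over candidates whose rest is a nonempty prefix of the remaining words"
theorem F_eq : ∀ (todo : List String) (best : Int) (alive : List (Int × List String)),
    (todo.foldl owStep (best, alive)).1 = alive.foldl (gP todo) best := by
  intro todo
  induction todo with
  | nil => intro best alive; exact (foldl_gP_nil alive best).symm
  | cons w ws ih =>
      intro best alive
      simp only [List.foldl_cons]
      have hs : owStep (best, alive) w = alive.foldl (owInner w) (best, []) := rfl
      rw [hs]
      have := ih (alive.foldl (owInner w) (best, [])).1 (alive.foldl (owInner w) (best, [])).2
      rw [Prod.mk.eta] at this
      rw [this, step_decomp]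
      rfl

-- a fold that keeps the last element satisfying p equals the first satisfying
-- element of the reversed list (with the initial accumulator as default)
theorem foldl_pick_eq_find_reverse {α : Type} (p : α → Bool) :
    ∀ (l : List α) (a : α),
      l.foldl (fun b s => if p s then s else b) a = ((l.reverse.find? p).getD a) := by
  intro l
  induction l with
  | nil => intro a; simp
  | cons x t ih =>
      intro a
      simp only [List.foldl_cons, List.reverse_cons, List.find?_append]
      rw [ih]
      cases h : t.reverse.find? p with
      | some y => simp
      | none => cases hp : p x <;> simp [hp]

-- on a strictly increasing list whose elements dominate the accumulator,
-- "keep the last match" and "keep the max match" coincide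
theorem foldl_replace_eq_foldl_max (q : Int → Bool) :
    ∀ (l : List Int) (b : Int), l.Pairwise (· < ·) → (∀ x ∈ l, b ≤ x) →
      l.foldl (fun b s => if q s then s else b) b
        = l.foldl (fun b s => if q s then max b s else b) b := by
  intro l
  induction l with
  | nil => intro b _ _; rfl
  | cons x t ih =>
      intro b hp hb
      simp only [List.foldl_cons]
      have hpt : t.Pairwise (· < ·) := (List.pairwise_cons.mp hp).2
      have hxt : ∀ y ∈ t, x < y := (List.pairwise_cons.mp hp).1
      by_cases hq : q x = true
      · rw [if_pos hq, if_pos hq]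
        have hbx : b ≤ x := hb x List.mem_cons_self
        rw [max_eq_right hbx]
        exact ih x hpt (fun y hy => le_of_lt (hxt y hy))
      · rw [if_neg hq, if_neg hq]
        exact ih b hpt (fun y hy => hb y (List.mem_cons_of_mem x hy))

-- for 1 ≤ s ≤ cap, A's slice-equality test equals B's candidate condition
theorem cond_bridge (prev cur : List String) (cap s b : Int)
    (hcap1 : cap ≤ (prev.length : Int)) (hs1 : 1 ≤ s) (hs2 : s ≤ cap) :
    (if (PySem.List.slice prev (some (-s)) none == PySem.List.slice cur none (some s)) then
        max b s else b)
      = gP cur b (s, PySem.List.slice prev (some ((prev.length : Int) - s)) none) := by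
  have hsn : s ≤ (prev.length : Int) := le_trans hs2 hcap1
  have hks : s = ((s.toNat : Int)) := (Int.toNat_of_nonneg (by omega)).symm
  have hkpos : 0 < s.toNat := by omega
  have hkle : s.toNat ≤ prev.length := by omega
  have hA : PySem.List.slice prev (some (-s)) none = prev.drop (prev.length - s.toNat) := by
    rw [hks]
    exact PySem.List.slice_from_neg_natCast prev s.toNat hkpos
  have hB : PySem.List.slice prev (some ((prev.length : Int) - s)) none
      = prev.drop (prev.length - s.toNat) := by
    rw [PySem.List.slice_from prev (by omega)]
    congr 1
    omega
  have hC : PySem.List.slice cur none (some s) = cur.take s.toNat :=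
    PySem.List.slice_to cur (by omega)
  have hlenR : (prev.drop (prev.length - s.toNat)).length = s.toNat := by
    rw [List.length_drop]; omega
  have hne : prev.drop (prev.length - s.toNat) ≠ [] := by
    intro h
    rw [h] at hlenR
    simp at hlenR
    omega
  have hiff : (prev.drop (prev.length - s.toNat) = cur.take s.toNat)
      ↔ (prev.drop (prev.length - s.toNat) ≠ [] ∧ prev.drop (prev.length - s.toNat) <+: cur) := by
    constructor
    · intro h
      refine ⟨hne, ?_⟩
      rw [List.prefix_iff_eq_take, hlenR]
      exact h
    · intro ⟨_, h⟩
      rw [List.prefix_iff_eq_take, hlenR] at h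
      exact h
  simp only [gP, hA, hB, hC]
  by_cases h : prev.drop (prev.length - s.toNat) = cur.take s.toNat
  · rw [if_pos (by simpa using h), if_pos (hiff.mp h)]
  · rw [if_neg (by simpa using h), if_neg (fun hc => h (hiff.mpr hc))]

-- ===== VERDICT (by name: the statement is the Claim_ definition above) =====
theorem overlap_window_py_spec : Claim_equal_overlap_window_py := by
  intro prev cur limit _
  unfold Spec_overlap_window_py overlap_window_py overlap_window_py_alt
  simp only []
  set n : Int := (prev.length : Int) with hn
  set cap : Int := min (min limit n) (cur.length : Int) with hcap
  have hcapn : cap ≤ n := by rw [hcap]; exact le_trans (min_le_left _ _) (min_le_right _ _)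
  -- A side: descending find? = ascending "keep last match" fold
  have hA0 : PySem.List.pyRange cap 0 (-1) = (PySem.List.pyRange 1 (cap + 1) 1).reverse := by
    have := PySem.List.pyRange_neg_one_eq_reverse cap 0
    simpa using this
  rw [hA0, ← foldl_pick_eq_find_reverse]
  -- B side: streaming loop = per-candidate fold of gP over the initial pool
  rw [F_eq, List.foldl_map]
  -- turn "keep last" into "keep max" on the strictly increasing range
  rw [foldl_replace_eq_foldl_max _ _ _ (PySem.List.pairwise_lt_pyRange_one 1 (cap + 1))
    (fun x hx => by have := (PySem.List.mem_pyRange_one.mp hx).1; omega)]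
  -- pointwise bridge between the two conditions, using 1 ≤ s ≤ cap from membership
  apply PySem.List.foldl_congr_mem
  intro b s hs
  have hmem := PySem.List.mem_pyRange_one.mp hs
  exact cond_bridge prev cur cap s b hcapn hmem.1 (by omega)
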